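-- pv_equiv track=rewrite | github.com/dinhlam2000/leetcodePractice | Okta/negativeBase2.py | base_negative_two_to_decimal
-- ===== SOURCE A (Python) =====
-- def base_negative_two_to_decimal(value):
--     sum = 0
--     # import pdb; pdb.set_trace()
--     for index, val in enumerate(value):
--         if val == 1:
--             decimal_value = 2 ** index
--             if index % 2 == 1:
--                 decimal_value = decimal_value * -1
--
--             sum = sum + decimal_value
--     return sum
-- ===== SOURCE B (Python) =====
-- def base_negative_two_to_decimal(value):
--     result = 0
--     for val in reversed(value):
--         result = result * -2 + (1 if val == 1 else 0)
--     return result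
-- ===== Notes on version B (the rewrite author's own statement) =====
-- stated objective: simpler
-- what changed: Replaces the per-index 2**index power and parity sign computation with Horner's method: one running accumulator multiplied by -2 over the digits from most significant to least.
import Mathlib
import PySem

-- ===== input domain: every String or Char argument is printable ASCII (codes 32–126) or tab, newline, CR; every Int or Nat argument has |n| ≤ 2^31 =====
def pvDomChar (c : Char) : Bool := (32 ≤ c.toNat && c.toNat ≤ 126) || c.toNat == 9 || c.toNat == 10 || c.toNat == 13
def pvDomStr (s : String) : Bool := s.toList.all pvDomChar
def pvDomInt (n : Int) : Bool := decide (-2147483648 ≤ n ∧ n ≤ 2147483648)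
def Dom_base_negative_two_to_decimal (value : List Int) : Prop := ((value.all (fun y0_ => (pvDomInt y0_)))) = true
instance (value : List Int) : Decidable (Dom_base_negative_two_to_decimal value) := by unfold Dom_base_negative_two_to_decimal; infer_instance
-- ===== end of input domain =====

-- B replaces A's per-index power-and-sign computation with Horner's method over the
-- reversed digit list (objective: simpler, one running accumulator).

-- ===== PORT A =====
-- for index, val in enumerate(value): if val == 1: decimal_value = 2**index;
--   if index % 2 == 1: decimal_value *= -1; sum += decimal_value
-- (index ≥ 0 always, so 2 ** index is ported as (2:Int) ^ index.toNat — exact here)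
def base_negative_two_to_decimal (value : List Int) : Int :=
  (PySem.List.enumerate value).foldl
    (fun sum p =>
      if p.2 == 1 then
        let decimal_value : Int := (2 : Int) ^ p.1.toNat
        let decimal_value := if PySem.Int.mod p.1 2 == 1 then decimal_value * -1 else decimal_value
        sum + decimal_value
      else sum) 0

-- ===== PORT B =====
-- for val in reversed(value): result = result * -2 + (1 if val == 1 else 0)
def base_negative_two_to_decimal_alt (value : List Int) : Int :=
  value.reverse.foldl (fun result val => result * -2 + (if val == 1 then 1 else 0)) 0

-- ===== PRECONDITION & SPEC =====
def Spec_base_negative_two_to_decimal (value : List Int) (out : Int) : Prop := out = base_negative_two_to_decimal_alt value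
instance (value : List Int) (out : Int) : Decidable (Spec_base_negative_two_to_decimal value out) := by unfold Spec_base_negative_two_to_decimal; infer_instance

-- ===== CLAIM (what is proved, stated in full; the proofs are below) =====
def Claim_equal_base_negative_two_to_decimal : Prop := ∀ (value : List Int), Dom_base_negative_two_to_decimal value → Spec_base_negative_two_to_decimal value (base_negative_two_to_decimal value)

-- ===== LEMMAS AND PROOFS =====

-- ===== VERDICT (by name: the statement is the Claim_ definition above) =====
-- Horner as a foldr (what B's foldl over the reversed list computes)
def pvHorner (l : List Int) : Int :=
  l.foldr (fun val acc => acc * -2 + (if val == 1 then 1 else 0)) 0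

theorem pvAlt_eq_horner (value : List Int) :
    base_negative_two_to_decimal_alt value = pvHorner value := by
  simp [base_negative_two_to_decimal_alt, pvHorner, List.foldl_reverse]

theorem pvSign_pow (k : Nat) :
    (if PySem.Int.mod (k : Int) 2 == 1 then ((2:Int) ^ k) * -1 else (2:Int) ^ k)
      = (-2 : Int) ^ k := by
  have hm : PySem.Int.mod (k : Int) 2 = ((k % 2 : Nat) : Int) := by
    exact_mod_cast PySem.Int.mod_natCast k 2
  rw [hm]
  rcases Nat.even_or_odd k with h | h
  · have h2 : k % 2 = 0 := Nat.even_iff.mp h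
    rw [h2, h.neg_pow]
    simp
  · have h2 : k % 2 = 1 := Nat.odd_iff.mp h
    rw [h2, h.neg_pow]
    simp

theorem pvA_loop (vs : List Int) (k : Nat) (s : Int) :
    (PySem.List.enumerate vs (k : Int)).foldl
      (fun sum p =>
        if p.2 == 1 then
          let decimal_value : Int := (2 : Int) ^ p.1.toNat
          let decimal_value := if PySem.Int.mod p.1 2 == 1 then decimal_value * -1 else decimal_value
          sum + decimal_value
        else sum) s
      = s + (-2 : Int) ^ k * pvHorner vs := by
  induction vs generalizing k s with
  | nil => simp [PySem.List.enumerate, pvHorner]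
  | cons v vs ih =>
    have hk1 : ((k : Int) + 1) = ((k + 1 : Nat) : Int) := by push_cast; ring
    simp only [PySem.List.enumerate_cons, List.foldl_cons, hk1, ih]
    have htn : ((k : Int)).toNat = k := Int.toNat_natCast k
    by_cases hv : v = 1
    · simp only [hv, pvHorner, List.foldr_cons]
      simp only [htn, pvSign_pow k]
      ring_nf
      simp
      ring
    · have : (v == 1) = false := by simp [hv]
      simp only [this, pvHorner, List.foldr_cons]
      simp [pow_succ]
      ring

theorem base_negative_two_to_decimal_spec : Claim_equal_base_negative_two_to_decimal := by
  intro value _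
  unfold Spec_base_negative_two_to_decimal
  have h0 := pvA_loop value 0 0
  simp only [base_negative_two_to_decimal] at *
  rw [pvAlt_eq_horner]
  simpa using h0
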